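-- pv_equiv track=rewrite | github.com/dlwnsgud8406/mysolved | programmers/level0/문자열 바꿔서 찾기.py | solution
-- ===== SOURCE A (Python) =====
-- def solution(myString, pat):
--     answer = 0
--     convert_string = ''
--     for char in myString:
--         if char == 'A':
--             convert_string += 'B'
--         else:
--             convert_string += 'A'
--     return 1 if pat in convert_string else 0
-- ===== SOURCE B (Python) =====
-- def solution(myString, pat):
--     # Search the untouched text with an explicit sliding window instead of
--     # building a converted copy of myString: a window matches when, at each
--     # offset, pat holds 'B' exactly where the text holds 'A'.
--     if not pat:
--         return 1
--     if any(c not in 'AB' for c in pat):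
--         return 0
--     n, m = len(myString), len(pat)
--     for i in range(n - m + 1):
--         if all((pat[j] == 'B') == (myString[i + j] == 'A') for j in range(m)):
--             return 1
--     return 0
-- ===== Notes on version B (the rewrite author's own statement) =====
-- stated objective: alternative
-- what changed: Instead of building a converted copy of the whole text and substring-searching the copy, B searches the original text directly with a sliding window, comparing pat's B positions against the text's A positions (after rejecting patterns with characters outside A/B, which can never match the converted text).
import Mathlib
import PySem

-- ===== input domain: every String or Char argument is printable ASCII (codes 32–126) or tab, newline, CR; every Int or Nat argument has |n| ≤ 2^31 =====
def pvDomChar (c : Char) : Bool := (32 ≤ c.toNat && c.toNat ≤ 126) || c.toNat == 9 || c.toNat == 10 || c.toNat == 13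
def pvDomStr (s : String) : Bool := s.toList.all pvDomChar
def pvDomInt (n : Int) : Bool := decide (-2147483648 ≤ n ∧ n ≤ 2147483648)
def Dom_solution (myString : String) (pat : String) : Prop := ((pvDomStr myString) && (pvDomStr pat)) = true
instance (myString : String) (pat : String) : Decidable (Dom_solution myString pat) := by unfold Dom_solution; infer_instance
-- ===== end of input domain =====

-- B searches the original text with a sliding window instead of building a converted copy; alternative decomposition, same cost.
-- ===== PORT A =====
def solution (myString : String) (pat : String) : Int :=
  let convert : List Char :=
    myString.toList.foldl (fun acc c => acc ++ [if c == 'A' then 'B' else 'A']) []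
  if PySem.Chars.isIn pat.toList convert then 1 else 0

-- ===== PORT B =====
def solution_alt (myString : String) (pat : String) : Int :=
  let s := myString.toList
  let p := pat.toList
  if p.isEmpty then 1
  else if p.any (fun c => !(c == 'A' || c == 'B')) then 0
  else if (List.range (s.length + 1 - p.length)).any (fun i =>
      (List.range p.length).all (fun j =>
        (p.getD j ' ' == 'B') == (s.getD (i + j) ' ' == 'A'))) then 1
  else 0

-- ===== PRECONDITION & SPEC =====
def Spec_solution (myString : String) (pat : String) (out : Int) : Prop := out = solution_alt myString pat
instance (myString : String) (pat : String) (out : Int) : Decidable (Spec_solution myString pat out) := by unfold Spec_solution; infer_instance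

-- ===== CLAIM (what is proved, stated in full; the proofs are below) =====
def Claim_equal_solution : Prop := ∀ (myString : String) (pat : String), Dom_solution myString pat → Spec_solution myString pat (solution myString pat)

-- ===== LEMMAS AND PROOFS =====

def pvF (c : Char) : Char := if c == 'A' then 'B' else 'A'

theorem pvF_mem (c : Char) : pvF c = 'A' ∨ pvF c = 'B' := by
  unfold pvF; split <;> simp

theorem char_match (a c : Char) (h : a = 'A' ∨ a = 'B') :
    ((a == 'B') == (c == 'A')) = true ↔ a = pvF c := by
  rcases h with h | h <;> subst h <;> unfold pvF <;> by_cases hc : c = 'A' <;>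
    simp [hc]

theorem prefix_window (t p : List Char) (i : Nat) (him : i + p.length ≤ t.length) :
    p <+: (t.map pvF).drop i ↔
      ∀ j (hj : j < p.length), p[j] = pvF (t[i + j]'(by omega)) := by
  rw [List.prefix_iff_eq_take]
  constructor
  · intro h j hj
    have hj' : j < (List.take p.length ((t.map pvF).drop i)).length := by
      simp; omega
    have := congrArg (fun l => l.getD j ' ') h
    simp only [List.getD_eq_getElem _ _ hj, List.getD_eq_getElem _ _ hj'] at this
    rw [this]
    simp [List.getElem_take, List.getElem_drop]
  · intro h
    apply List.ext_getElem
    · simp; omega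
    · intro j hj hj2
      simp only [List.getElem_take, List.getElem_drop, List.getElem_map]
      exact h j hj

theorem window_iff (s p : List Char) (hp : p ≠ [])
    (hgood : ∀ c ∈ p, c = 'A' ∨ c = 'B') :
    PySem.Chars.isIn p (s.map pvF) =
      (List.range (s.length + 1 - p.length)).any (fun i =>
        (List.range p.length).all (fun j =>
          (p.getD j ' ' == 'B') == (s.getD (i + j) ' ' == 'A'))) := by
  rcases Bool.eq_false_or_eq_true ((List.range (s.length + 1 - p.length)).any (fun i =>
        (List.range p.length).all (fun j =>
          (p.getD j ' ' == 'B') == (s.getD (i + j) ' ' == 'A')))) with hB | hB <;> rw [hB]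
  · rw [List.any_eq_true] at hB
    obtain ⟨i, hiR, hi⟩ := hB
    rw [List.mem_range] at hiR
    have hm : 1 ≤ p.length := List.length_pos_of_ne_nil hp
    have him : i + p.length ≤ s.length := by omega
    rw [← PySem.Chars.exists_prefix_drop_iff_isIn]
    refine ⟨i, (prefix_window s p i him).mpr ?_⟩
    intro j hj
    rw [List.all_eq_true] at hi
    have := hi j (List.mem_range.mpr hj)
    rw [List.getD_eq_getElem _ _ hj, List.getD_eq_getElem _ _ (by omega : i + j < s.length)] at this
    exact (char_match _ _ (hgood _ (List.getElem_mem _))).mp this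
  · rw [← Bool.not_eq_true, ← PySem.Chars.exists_prefix_drop_iff_isIn]
    rw [← Bool.not_eq_true, List.any_eq_true] at hB
    push Not at hB
    rintro ⟨i, hi⟩
    have hlen : p.length ≤ ((s.map pvF).drop i).length := hi.length_le
    simp only [List.length_drop, List.length_map] at hlen
    have hm : 1 ≤ p.length := List.length_pos_of_ne_nil hp
    have him : i + p.length ≤ s.length := by omega
    have hiR : i ∈ List.range (s.length + 1 - p.length) := by
      rw [List.mem_range]; omega
    have := hB i hiR
    apply this
    rw [List.all_eq_true]
    intro j hj
    rw [List.mem_range] at hj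
    rw [List.getD_eq_getElem _ _ hj, List.getD_eq_getElem _ _ (by omega : i + j < s.length)]
    rw [char_match _ _ (hgood _ (List.getElem_mem _))]
    exact (prefix_window s p i him).mp hi j hj

theorem main_eq (s p : List Char) :
    (if PySem.Chars.isIn p (s.foldl (fun acc c => acc ++ [if c == 'A' then 'B' else 'A']) []) then (1 : Int) else 0) =
    (if p.isEmpty then (1 : Int)
     else if p.any (fun c => !(c == 'A' || c == 'B')) then 0
     else if (List.range (s.length + 1 - p.length)).any (fun i =>
         (List.range p.length).all (fun j =>
           (p.getD j ' ' == 'B') == (s.getD (i + j) ' ' == 'A'))) then 1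
     else 0) := by
  have hconv : s.foldl (fun acc c => acc ++ [if c == 'A' then 'B' else 'A']) [] = s.map pvF := by
    simpa [pvF] using PySem.List.foldl_append_singleton_eq_map pvF s []
  rw [hconv]
  by_cases hp : p = []
  · subst hp; simp [PySem.Chars.isIn_nil]
  · have hne : p.isEmpty = false := by simp [hp]
    by_cases hbad : p.any (fun c => !(c == 'A' || c == 'B')) = true
    · obtain ⟨c, hc, hcb⟩ := List.any_eq_true.mp hbad
      have hfalse : PySem.Chars.isIn p (s.map pvF) = false := by
        rw [← Bool.not_eq_true, PySem.Chars.isIn_iff_infix]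
        intro hinf
        have hmem := List.Sublist.mem hc hinf.sublist
        rw [List.mem_map] at hmem
        obtain ⟨x, _, hx⟩ := hmem
        rcases pvF_mem x with h | h <;> rw [hx] at h <;> simp [h] at hcb
      rw [hfalse, hne, hbad]
      simp
    · have hgood : ∀ c ∈ p, c = 'A' ∨ c = 'B' := by
        intro c hc
        by_contra h
        push Not at h
        exact hbad (List.any_eq_true.mpr ⟨c, hc, by simp [h.1, h.2]⟩)
      rw [Bool.not_eq_true] at hbad
      rw [window_iff s p hp hgood, hne, hbad]
      simp

-- ===== VERDICT (by name: the statement is the Claim_ definition above) =====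
theorem solution_spec : Claim_equal_solution := by
  intro myString pat _
  unfold Spec_solution
  exact main_eq myString.toList pat.toList
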